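-- pv_equiv track=rewrite | github.com/aaclause/BrailleExtender | addon/globalPlugins/brailleExtender/huc.py | translateHUC8
-- ===== SOURCE A (Python) =====
-- print_ = print
--
-- def translateHUC8(dots, debug=False):
-- 	out = ""
-- 	newDots = "037168425"
-- 	for dot in dots:
-- 		out += newDots[int(dot)]
-- 	out = ''.join(sorted(out))
-- 	if debug:
-- 		print_(":translateHUC8:", dots, "->", out)
-- 	return out
-- ===== SOURCE B (Python) =====
-- def translateHUC8(dots, debug=False):
-- 	newDots = "037168425"
-- 	counts = [0] * 9
-- 	for dot in dots:
-- 		c = newDots[int(dot)]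
-- 		counts[ord(c) - 48] += 1
-- 	out = ''.join(chr(48 + i) * counts[i] for i in range(9))
-- 	if debug:
-- 		print(":translateHUC8:", dots, "->", out)
-- 	return out
-- ===== Notes on version B (the rewrite author's own statement) =====
-- stated objective: alternative
-- what changed: Replaces building the translated string and sorting it with a counting sort: the loop increments a nine-slot bucket per translated digit character and the output concatenates the nine possible digit characters in ascending order, each repeated by its count, with no sort call.
import Mathlib
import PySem

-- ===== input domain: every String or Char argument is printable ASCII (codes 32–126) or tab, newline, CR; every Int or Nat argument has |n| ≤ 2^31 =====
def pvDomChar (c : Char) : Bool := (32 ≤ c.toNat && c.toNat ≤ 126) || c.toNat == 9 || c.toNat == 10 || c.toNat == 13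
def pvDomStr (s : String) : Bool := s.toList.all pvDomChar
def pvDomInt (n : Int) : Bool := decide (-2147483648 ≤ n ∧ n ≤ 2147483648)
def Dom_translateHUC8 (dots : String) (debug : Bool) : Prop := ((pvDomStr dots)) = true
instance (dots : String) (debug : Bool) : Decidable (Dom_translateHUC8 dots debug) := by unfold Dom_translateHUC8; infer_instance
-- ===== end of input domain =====

-- B replaces A's build-then-sort with a counting sort over the nine target digit characters;
-- equivalence is about the RETURN value only (the debug print is a side effect not modelled here).

-- ===== PORT A =====
-- loop: for dot in dots: out += newDots[int(dot)]  (none = the Python raises)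
def tA_loop (acc : List Char) : List Char → Option (List Char)
  | [] => some acc
  | d :: ds =>
    match PySem.Int.ofStr? (String.mk [d]) with
    | none => none
    | some i =>
      match PySem.List.pyGet? "037168425".toList i with
      | none => none
      | some c => tA_loop (acc ++ [c]) ds

def translateHUC8 (dots : String) (_debug : Bool) : String :=
  match tA_loop [] dots.toList with
  | some out => String.mk (PySem.List.sorted out (fun x => x) false)   -- ''.join(sorted(out))
  | none => ""   -- unreachable under Pre_translateHUC8 (the Python raises there)

-- ===== PORT B =====
-- loop: counts[ord(newDots[int(dot)]) - 48] += 1  (none = the Python raises, same point as A)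
def tB_loop (counts : List Nat) : List Char → Option (List Nat)
  | [] => some counts
  | d :: ds =>
    match PySem.Int.ofStr? (String.mk [d]) with
    | none => none
    | some i =>
      match PySem.List.pyGet? "037168425".toList i with
      | none => none
      | some c => tB_loop (counts.set (c.toNat - 48) (counts.getD (c.toNat - 48) 0 + 1)) ds

-- ''.join(chr(48 + i) * counts[i] for i in range(9))
def tB_build (counts : List Nat) : List Char :=
  (List.range 9).flatMap (fun i => List.replicate (counts.getD i 0) (Char.ofNat (48 + i)))

def translateHUC8_alt (dots : String) (_debug : Bool) : String :=
  match tB_loop (List.replicate 9 0) dots.toList with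
  | some counts => String.mk (tB_build counts)
  | none => ""   -- unreachable under Pre_translateHUC8 (the Python raises there)

-- ===== PRECONDITION & SPEC =====
-- Within the ASCII input domain Dom_translateHUC8, Pre_ excludes exactly the inputs on which A
-- raises and B raises identically (in Dom only the characters '0'..'8' both parse with int() and
-- index the 9-character table; any other Dom character makes both programs raise ValueError, or
-- IndexError for '9', at the same loop step).
def Pre_translateHUC8 (dots : String) (debug : Bool) : Prop :=
  dots.toList.all (fun c => 48 ≤ c.toNat && c.toNat ≤ 56) = true
instance (dots : String) (debug : Bool) : Decidable (Pre_translateHUC8 dots debug) := by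
  unfold Pre_translateHUC8; infer_instance

def pvWitness_translateHUC8 : String × Bool := ("30581", false)

def Spec_translateHUC8 (dots : String) (debug : Bool) (out : String) : Prop := out = translateHUC8_alt dots debug
instance (dots : String) (debug : Bool) (out : String) : Decidable (Spec_translateHUC8 dots debug out) := by unfold Spec_translateHUC8; infer_instance

-- ===== CLAIM (what is proved, stated in full; the proofs are below) =====
def Claim_equal_translateHUC8 : Prop := ∀ (dots : String) (debug : Bool), Dom_translateHUC8 dots debug → Pre_translateHUC8 dots debug → Spec_translateHUC8 dots debug (translateHUC8 dots debug)

-- ===== LEMMAS AND PROOFS =====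

def countsVec (l : List Char) : List Nat :=
  (List.range 9).map (fun i => l.count (Char.ofNat (48 + i)))

theorem char_toNat_inj {c d : Char} (h : c.toNat = d.toNat) : c = d := by
  have := UInt32.toNat_inj.mp h
  exact Char.ext this

theorem char_digit_cases (c : Char) (h1 : 48 ≤ c.toNat) (h2 : c.toNat ≤ 56) :
    c = '0' ∨ c = '1' ∨ c = '2' ∨ c = '3' ∨ c = '4' ∨ c = '5' ∨ c = '6' ∨ c = '7' ∨ c = '8' := by
  have h : c.toNat = 48 ∨ c.toNat = 49 ∨ c.toNat = 50 ∨ c.toNat = 51 ∨ c.toNat = 52 ∨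
      c.toNat = 53 ∨ c.toNat = 54 ∨ c.toNat = 55 ∨ c.toNat = 56 := by omega
  rcases h with h|h|h|h|h|h|h|h|h
  · exact Or.inl (char_toNat_inj (by rw [h]; try decide))
  · exact Or.inr (Or.inl (char_toNat_inj (by rw [h]; try decide)))
  · exact Or.inr (Or.inr (Or.inl (char_toNat_inj (by rw [h]; try decide))))
  · exact Or.inr (Or.inr (Or.inr (Or.inl (char_toNat_inj (by rw [h]; try decide)))))
  · exact Or.inr (Or.inr (Or.inr (Or.inr (Or.inl (char_toNat_inj (by rw [h]; try decide))))))
  · exact Or.inr (Or.inr (Or.inr (Or.inr (Or.inr (Or.inl (char_toNat_inj (by rw [h]; try decide)))))))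
  · exact Or.inr (Or.inr (Or.inr (Or.inr (Or.inr (Or.inr (Or.inl (char_toNat_inj (by rw [h]; try decide))))))))
  · exact Or.inr (Or.inr (Or.inr (Or.inr (Or.inr (Or.inr (Or.inr (Or.inl (char_toNat_inj (by rw [h]; try decide)))))))))
  · exact Or.inr (Or.inr (Or.inr (Or.inr (Or.inr (Or.inr (Or.inr (Or.inr (char_toNat_inj (by rw [h]; try decide)))))))))

theorem ofStr_digit (d : Char) (h1 : 48 ≤ d.toNat) (h2 : d.toNat ≤ 56) :
    PySem.Int.ofStr? (String.mk [d]) = some ((d.toNat : Int) - 48) := by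
  rcases char_digit_cases d h1 h2 with h|h|h|h|h|h|h|h|h <;> subst h <;> decide

theorem get_digit (d : Char) (h1 : 48 ≤ d.toNat) (h2 : d.toNat ≤ 56) :
    PySem.List.pyGet? "037168425".toList ((d.toNat : Int) - 48) =
        some ("037168425".toList.getD (d.toNat - 48) ' ') ∧
      48 ≤ ("037168425".toList.getD (d.toNat - 48) ' ').toNat ∧
      ("037168425".toList.getD (d.toNat - 48) ' ').toNat ≤ 56 := by
  rcases char_digit_cases d h1 h2 with h|h|h|h|h|h|h|h|h <;> subst h <;> exact ⟨by decide, by decide, by decide⟩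

theorem countsVec_length (acc : List Char) : (countsVec acc).length = 9 := by
  simp [countsVec]

theorem countsVec_append (acc : List Char) (c : Char) (h1 : 48 ≤ c.toNat) (h2 : c.toNat ≤ 56) :
    countsVec (acc ++ [c]) =
      (countsVec acc).set (c.toNat - 48) ((countsVec acc).getD (c.toNat - 48) 0 + 1) := by
  have hc : Char.ofNat (48 + (c.toNat - 48)) = c := by
    have : 48 + (c.toNat - 48) = c.toNat := by omega
    rw [this, Char.ofNat_toNat]
  apply List.ext_getElem
  · simp [countsVec]
  intro j hj hj'
  have hj9 : j < 9 := by simpa [countsVec] using hj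
  have hlt : c.toNat - 48 < 9 := by omega
  rw [List.getElem_set]
  have hgd : (countsVec acc).getD (c.toNat - 48) 0 = acc.count c := by
    rw [List.getD_eq_getElem _ _ (by rw [countsVec_length]; omega)]
    simp [countsVec, hc]
  have hv : (Char.ofNat (48 + j)).toNat = 48 + j := by interval_cases j <;> decide
  by_cases he : c.toNat - 48 = j
  · subst he
    rw [if_pos rfl, hgd]
    simp [countsVec, hc, List.count_append]
  · rw [if_neg he]
    have hne : c ≠ Char.ofNat (48 + j) := by
      intro e
      apply he
      have : c.toNat = 48 + j := by rw [e, hv]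
      omega
    simp [countsVec, List.count_append, List.count_singleton, hne]

theorem loops_corr (ds : List Char) : ∀ acc : List Char,
    (∀ d ∈ ds, 48 ≤ d.toNat ∧ d.toNat ≤ 56) → (∀ c ∈ acc, 48 ≤ c.toNat ∧ c.toNat ≤ 56) →
    ∃ out, tA_loop acc ds = some out ∧ tB_loop (countsVec acc) ds = some (countsVec out) ∧
      ∀ c ∈ out, 48 ≤ c.toNat ∧ c.toNat ≤ 56 := by
  induction ds with
  | nil => intro acc _ hacc; exact ⟨acc, rfl, rfl, hacc⟩
  | cons d ds ih =>
    intro acc hds hacc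
    obtain ⟨h1, h2⟩ := hds d List.mem_cons_self
    obtain ⟨hget, hc1, hc2⟩ := get_digit d h1 h2
    set c := "037168425".toList.getD (d.toNat - 48) ' ' with hcdef
    obtain ⟨out, hA, hB, hout⟩ := ih (acc ++ [c])
      (fun x hx => hds x (List.mem_cons_of_mem _ hx))
      (by intro x hx
          rcases List.mem_append.mp hx with h | h
          · exact hacc x h
          · rcases List.mem_singleton.mp h with rfl; exact ⟨hc1, hc2⟩)
    refine ⟨out, ?_, ?_, hout⟩
    · simp only [tA_loop, ofStr_digit d h1 h2, hget]
      exact hA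
    · simp only [tB_loop, ofStr_digit d h1 h2, hget]
      rw [← countsVec_append acc c hc1 hc2]
      exact hB

theorem sorted_eq_build (l : List Char) (h : ∀ c ∈ l, 48 ≤ c.toNat ∧ c.toNat ≤ 56) :
    PySem.List.sorted l (fun x => x) false = tB_build (countsVec l) := by
  have hb : tB_build (countsVec l) =
      List.replicate (l.count '0') '0' ++ (List.replicate (l.count '1') '1' ++
      (List.replicate (l.count '2') '2' ++ (List.replicate (l.count '3') '3' ++
      (List.replicate (l.count '4') '4' ++ (List.replicate (l.count '5') '5' ++
      (List.replicate (l.count '6') '6' ++ (List.replicate (l.count '7') '7' ++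
      (List.replicate (l.count '8') '8' ++ ([] : List Char))))))))) := by
    simp [tB_build, countsVec, show List.range 9 = [0,1,2,3,4,5,6,7,8] from rfl]
  apply PySem.List.sorted_id_eq_of_perm_of_pairwise
  · rw [hb, List.perm_iff_count]
    intro a
    simp only [List.count_append, List.count_replicate, List.count_nil]
    by_cases hd : 48 ≤ a.toNat ∧ a.toNat ≤ 56
    · rcases char_digit_cases a hd.1 hd.2 with h|h|h|h|h|h|h|h|h <;> subst h <;> simp
    · have ha : a ∉ l := fun m => hd (h a m)
      rw [List.count_eq_zero_of_not_mem ha]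
      have : ∀ b : Char, 48 ≤ b.toNat → b.toNat ≤ 56 → (b == a) = false := by
        intro b hb1 hb2
        rw [beq_eq_false_iff_ne]
        rintro rfl
        exact hd ⟨hb1, hb2⟩
      rw [this '0' (by decide) (by decide), this '1' (by decide) (by decide),
        this '2' (by decide) (by decide), this '3' (by decide) (by decide),
        this '4' (by decide) (by decide), this '5' (by decide) (by decide),
        this '6' (by decide) (by decide), this '7' (by decide) (by decide),
        this '8' (by decide) (by decide)]
      simp
  · have hp : (List.range 9).Pairwise
        (fun i j => ∀ x ∈ List.replicate ((countsVec l).getD i 0) (Char.ofNat (48 + i)),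
          ∀ y ∈ List.replicate ((countsVec l).getD j 0) (Char.ofNat (48 + j)), x ≤ y) := by
      have hp0 : (List.range 9).Pairwise
          (fun i j => Char.ofNat (48 + i) ≤ Char.ofNat (48 + j)) := by decide
      refine hp0.imp ?_
      intro i j hij x hx y hy
      rw [List.eq_of_mem_replicate hx, List.eq_of_mem_replicate hy]
      exact hij
    exact List.pairwise_flatMap.mpr
      ⟨fun i _ => (List.pairwise_replicate).mpr (Or.inr le_rfl), hp⟩

-- ===== VERDICT (by name: the statement is the Claim_ definition above) =====
theorem translateHUC8_spec : Claim_equal_translateHUC8 := by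
  intro dots debug _ hpre
  unfold Spec_translateHUC8 translateHUC8 translateHUC8_alt
  have hpre' : ∀ d ∈ dots.toList, 48 ≤ d.toNat ∧ d.toNat ≤ 56 := by
    intro d hd
    have := List.all_eq_true.mp hpre d hd
    simpa using this
  obtain ⟨out, hA, hB, hout⟩ := loops_corr dots.toList [] hpre' (by simp)
  have h0 : countsVec [] = List.replicate 9 0 := by decide
  rw [h0] at hB
  rw [hA, hB]
  exact congrArg String.mk (sorted_eq_build out hout)
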